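-- pv_equiv track=rewrite | github.com/MrBrantCode/unitest_baseline | mut_generate/mist_train_taco/taco_16513/solution.py | longest_good_subsequence_length
-- ===== SOURCE A (Python) =====
-- def longest_good_subsequence_length(n, k, s):
--     # Create a dictionary to count the frequency of each letter in s
--     letter_count = {}
--     for char in s:
--         if char in letter_count:
--             letter_count[char] += 1
--         else:
--             letter_count[char] = 1
--
--     # If the number of distinct letters in s is less than k, return 0
--     if len(letter_count) < k:
--         return 0
--
--     # Find the minimum frequency of the letters in the dictionary
--     min_frequency = min(letter_count.values())
--
--     # The length of the longest good subsequence is k times the minimum frequency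
--     return min_frequency * k
-- ===== SOURCE B (Python) =====
-- def longest_good_subsequence_length(n, k, s):
--     # Sort the string so equal letters are adjacent, then scan runs:
--     # each run length is one letter's frequency.
--     counts = []
--     run = 0
--     prev = None
--     for c in sorted(s):
--         if c == prev:
--             run += 1
--         else:
--             if run:
--                 counts.append(run)
--             run = 1
--             prev = c
--     if run:
--         counts.append(run)
--     if len(counts) < k:
--         return 0
--     return min(counts) * k
-- ===== Notes on version B (the rewrite author's own statement) =====
-- stated objective: alternative
-- what changed: Replaces the dict-accumulation of letter frequencies by sorting the string and scanning runs of equal adjacent letters, collecting run lengths; the distinct-count and min are then taken over the run-length list.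
-- outside the precondition, e.g. on longest_good_subsequence_length(0, 0, ''): A raises ValueError, B raises ValueError
import Mathlib
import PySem

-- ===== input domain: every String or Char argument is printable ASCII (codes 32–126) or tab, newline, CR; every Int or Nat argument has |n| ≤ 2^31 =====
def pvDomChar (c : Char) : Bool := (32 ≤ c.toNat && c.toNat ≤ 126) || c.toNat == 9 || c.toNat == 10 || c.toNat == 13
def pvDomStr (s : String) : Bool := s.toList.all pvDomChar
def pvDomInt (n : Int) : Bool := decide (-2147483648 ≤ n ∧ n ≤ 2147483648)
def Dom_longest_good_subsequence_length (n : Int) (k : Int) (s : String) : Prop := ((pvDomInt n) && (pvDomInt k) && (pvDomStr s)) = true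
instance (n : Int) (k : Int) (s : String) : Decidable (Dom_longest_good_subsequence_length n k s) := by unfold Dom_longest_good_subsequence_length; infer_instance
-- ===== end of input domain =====

-- B sorts the string and scans runs of equal adjacent letters instead of accumulating a frequency dict (objective: alternative).

-- ===== PORT A =====
def longest_good_subsequence_length (n : Int) (k : Int) (s : String) : Int :=
  let letter_count := s.toList.foldl
    (fun d c => if d.contains c then d.insert c (d.getD c 0 + 1) else d.insert c 1)
    (PySem.Dict.empty : PySem.Dict Char Int)
  if (letter_count.size : Int) < k then 0
  else (PySem.List.min? letter_count.values (fun x => x)).getD 0 * k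

-- ===== PORT B =====
-- one iteration of Source B's for-loop: state (counts, run, prev)
def pvStep (st : List Int × Int × Option Char) (c : Char) : List Int × Int × Option Char :=
  match st with
  | (counts, run, prev) =>
    if (match prev with | some p => p == c | none => false) then (counts, run + 1, prev)
    else ((if run ≠ 0 then counts ++ [run] else counts), 1, some c)

def longest_good_subsequence_length_alt (n : Int) (k : Int) (s : String) : Int :=
  let st := (PySem.List.sorted s.toList (fun c => c) false).foldl pvStep ([], 0, none)
  let counts := if st.2.1 ≠ 0 then st.1 ++ [st.2.1] else st.1
  if (counts.length : Int) < k then 0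
  else (PySem.List.min? counts (fun x => x)).getD 0 * k

-- ===== PRECONDITION & SPEC =====
-- Pre_ excludes exactly the inputs (s empty and k ≤ 0) on which A's min([]) raises ValueError (B raises there too).
def Pre_longest_good_subsequence_length (n : Int) (k : Int) (s : String) : Prop :=
  ¬ (s.toList = [] ∧ k ≤ 0)
instance (n : Int) (k : Int) (s : String) : Decidable (Pre_longest_good_subsequence_length n k s) := by unfold Pre_longest_good_subsequence_length; infer_instance
def pvWitness_longest_good_subsequence_length : Int × Int × String := (5, 2, "aabbc")

def Spec_longest_good_subsequence_length (n : Int) (k : Int) (s : String) (out : Int) : Prop := out = longest_good_subsequence_length_alt n k s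
instance (n : Int) (k : Int) (s : String) (out : Int) : Decidable (Spec_longest_good_subsequence_length n k s out) := by unfold Spec_longest_good_subsequence_length; infer_instance

-- ===== CLAIM (what is proved, stated in full; the proofs are below) =====
def Claim_equal_longest_good_subsequence_length : Prop := ∀ (n : Int) (k : Int) (s : String), Dom_longest_good_subsequence_length n k s → Pre_longest_good_subsequence_length n k s → Spec_longest_good_subsequence_length n k s (longest_good_subsequence_length n k s)

-- ===== LEMMAS AND PROOFS =====

-- the run-length list of a list whose equal elements are adjacent, as a recursion
def pvRunsSpec : List Char → List Int
  | [] => []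
  | c :: cs =>
    (1 + ((cs.takeWhile (· == c)).length : Int)) :: pvRunsSpec (cs.dropWhile (· == c))
termination_by t => t.length
decreasing_by
  simpa using Nat.lt_succ_of_le (List.length_dropWhile_le _ _)

def pvFinish (st : List Int × Int × Option Char) : List Int :=
  if st.2.1 ≠ 0 then st.1 ++ [st.2.1] else st.1

-- A's branching update is pointwise the counter update.
theorem pv_fold_eq_counter (l : List Char) :
    l.foldl (fun d c => if d.contains c then d.insert c (d.getD c 0 + 1) else d.insert c 1)
      (PySem.Dict.empty : PySem.Dict Char Int)
    = PySem.Dict.counter l := by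
  rw [← PySem.Dict.foldl_insert_getD_add_one_eq_counter]
  congr 1
  funext d c
  by_cases h : d.contains c = true
  · simp [h]
  · have hget : d.get? c = none := by
      rw [PySem.Dict.contains_eq_isSome_get?] at h
      cases hg : d.get? c with
      | none => rfl
      | some v => rw [hg] at h; simp at h
    simp [h, PySem.Dict.getD, hget]

theorem pv_values_counter (l : List Char) :
    (PySem.Dict.counter l).values = (PySem.List.dedup l).map (fun c => (l.count c : Int)) := by
  rw [PySem.Dict.values_eq_map_keys _ (PySem.Dict.nodup_keys_counter l) 0,
      PySem.Dict.keys_counter, PySem.List.dedup_eq_ofList]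
  exact List.map_congr_left (fun c _ => PySem.Dict.getD_counter l c)

theorem pv_size_counter (l : List Char) :
    (PySem.Dict.counter l).size = (PySem.List.dedup l).length := by
  have : (PySem.Dict.counter l).keys.length = (PySem.List.dedup l).length := by
    rw [PySem.Dict.keys_counter, PySem.List.dedup_eq_ofList]
  simpa [PySem.Dict.size, PySem.Dict.keys, List.length_map] using this

-- the scan loop, from a live state (run ≥ 1, last letter p ≤ everything still to come)
theorem pv_aux (t : List Char) :
    ∀ (acc : List Int) (r : Int) (p : Char), 1 ≤ r → t.Pairwise (· ≤ ·) → (∀ c ∈ t, p ≤ c) →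
    pvFinish (t.foldl pvStep (acc, r, some p)) =
      acc ++ (r + ((t.takeWhile (· == p)).length : Int)) :: pvRunsSpec (t.dropWhile (· == p)) := by
  induction t with
  | nil =>
    intro acc r p hr _ _
    have : r ≠ 0 := by omega
    simp [pvFinish, pvRunsSpec, this]
  | cons c t' ih =>
    intro acc r p hr hs hp
    by_cases hc : p = c
    · subst hc
      have h1 : pvStep (acc, r, some p) p = (acc, r + 1, some p) := by simp [pvStep]
      rw [List.foldl_cons, h1, ih acc (r + 1) p (by omega) hs.of_cons
          (fun d hd => hp d (List.mem_cons_of_mem _ hd))]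
      simp
      ring_nf
    · have hbc : (p == c) = false := by simp [hc]
      have h1 : pvStep (acc, r, some p) c = (acc ++ [r], 1, some c) := by
        have : r ≠ 0 := by omega
        simp [pvStep, hbc, this]
      have hle : ∀ d ∈ t', c ≤ d := fun d hd => (List.pairwise_cons.mp hs).1 d hd
      rw [List.foldl_cons, h1, ih (acc ++ [r]) 1 c (le_refl 1) hs.of_cons hle]
      have hcb : (c == p) = false := by simp; exact fun h => hc h.symm
      simp [hcb, pvRunsSpec, List.append_assoc]

-- the whole loop computes the run lengths of a sorted list
theorem pv_loop_eq_runs (t : List Char) (hs : t.Pairwise (· ≤ ·)) :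
    pvFinish (t.foldl pvStep ([], 0, none)) = pvRunsSpec t := by
  cases t with
  | nil => simp [pvFinish, pvRunsSpec]
  | cons c t' =>
    have h1 : pvStep ([], 0, none) c = ([], 1, some c) := by simp [pvStep]
    have hle : ∀ d ∈ t', c ≤ d := fun d hd => (List.pairwise_cons.mp hs).1 d hd
    rw [List.foldl_cons, h1, pv_aux t' [] 1 c (le_refl 1) hs.of_cons hle]
    simp [pvRunsSpec]

theorem pv_not_mem_dropWhile (c : Char) (cs : List Char)
    (hs : cs.Pairwise (· ≤ ·)) (hle : ∀ x ∈ cs, c ≤ x) :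
    c ∉ cs.dropWhile (· == c) := by
  induction cs with
  | nil => simp
  | cons x xs ih =>
    by_cases hx : x = c
    · subst hx
      simp only [List.dropWhile_cons, BEq.rfl]
      exact ih hs.of_cons (fun y hy => hle y (List.mem_cons_of_mem _ hy))
    · have : (x == c) = false := by simp [hx]
      simp only [List.dropWhile_cons, this]
      intro hmem
      rcases List.mem_cons.mp hmem with h | h
      · exact hx h.symm
      · have h1 : x ≤ c := (List.pairwise_cons.mp hs).1 c h
        have h2 : c ≤ x := hle x List.mem_cons_self
        exact hx (le_antisymm h1 h2)

-- run lengths of a sorted list = the letter frequencies (as a multiset)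
theorem pv_runs_perm (t : List Char) (hs : t.Pairwise (· ≤ ·)) :
    (pvRunsSpec t).Perm ((PySem.List.dedup t).map (fun c => (t.count c : Int))) := by
  induction t using pvRunsSpec.induct with
  | case1 => simp [pvRunsSpec, PySem.List.dedup]
  | case2 c cs ih =>
    have hsc := (List.pairwise_cons.mp hs).1
    set m := cs.takeWhile (· == c) with hm
    set rest := cs.dropWhile (· == c) with hrest
    have hcs : m ++ rest = cs := List.takeWhile_append_dropWhile
    have hmall : ∀ x ∈ m, x = c := by
      intro x hx
      have := List.mem_takeWhile_imp hx
      simpa using this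
    have hrs : rest.Pairwise (· ≤ ·) :=
      List.Pairwise.sublist (List.dropWhile_sublist _) hs.of_cons
    have hcrest : c ∉ rest :=
      pv_not_mem_dropWhile c cs hs.of_cons hsc
    -- count facts
    have hcount_c : (c :: cs).count c = 1 + m.length := by
      have h1 : m.count c = m.length := List.count_eq_length.mpr (fun x hx => (hmall x hx).symm)
      have h2 : rest.count c = 0 := List.count_eq_zero.mpr hcrest
      have h3 : cs.count c = m.length := by
        rw [← hcs, List.count_append, h1, h2]
        omega
      simp
      omega
    have hcount_d : ∀ d ∈ rest, (c :: cs).count d = rest.count d := by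
      intro d hd
      have hdc : d ≠ c := fun h => hcrest (h ▸ hd)
      have h1 : m.count d = 0 := List.count_eq_zero.mpr (fun hmem => hdc (hmall d hmem))
      rw [← hcs]
      simp [List.count_append, h1, Ne.symm hdc]
    -- dedup fact
    have hded : (PySem.List.dedup (c :: cs)).Perm (c :: PySem.List.dedup rest) := by
      apply (List.perm_ext_iff_of_nodup (PySem.List.nodup_dedup _) ?_).mpr
      · intro x
        simp only [PySem.List.mem_dedup, List.mem_cons]
        rw [← hcs]
        constructor
        · rintro (h | h)
          · exact Or.inl h
          · rcases List.mem_append.mp h with h' | h'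
            · exact Or.inl (hmall x h')
            · exact Or.inr h'
        · rintro (h | h)
          · exact Or.inl h
          · exact Or.inr (List.mem_append_right _ h)
      · exact List.nodup_cons.mpr ⟨fun h => hcrest ((PySem.List.mem_dedup _ _).mp h),
          PySem.List.nodup_dedup _⟩
    -- chain
    have step1 : (pvRunsSpec (c :: cs)).Perm
        ((1 + (m.length : Int)) :: (PySem.List.dedup rest).map (fun d => (rest.count d : Int))) := by
      rw [pvRunsSpec]
      exact (ih hrs).cons _
    have hcount_c' : (((c :: cs).count c : Int)) = 1 + (m.length : Int) := by
      rw [hcount_c]; push_cast; ring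
    have step2 : ((1 + (m.length : Int)) :: (PySem.List.dedup rest).map (fun d => (rest.count d : Int)))
        = (c :: PySem.List.dedup rest).map (fun d => (((c :: cs).count d : Int))) := by
      rw [List.map_cons, hcount_c']
      congr 1
      exact (List.map_congr_left (fun d hd => by
        rw [hcount_d d ((PySem.List.mem_dedup _ _).mp hd)])).symm
    rw [step2] at step1
    exact step1.trans (hded.map _).symm

-- B's counts list is a permutation of A's dict values
theorem pv_counts_perm (l : List Char) :
    (pvFinish ((PySem.List.sorted l (fun c => c) false).foldl pvStep ([], 0, none))).Perm
      ((PySem.Dict.counter l).values) := by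
  set t := PySem.List.sorted l (fun c => c) false with ht
  have hperm : t.Perm l := PySem.List.sorted_perm l _ _
  have hs : t.Pairwise (· ≤ ·) := by
    have := PySem.List.sorted_pairwise l (fun c : Char => c) (κ := Char)
    simpa using this
  rw [pv_loop_eq_runs t hs, pv_values_counter]
  refine (pv_runs_perm t hs).trans ?_
  have hmap : (PySem.List.dedup t).map (fun c => (t.count c : Int))
      = (PySem.List.dedup t).map (fun c => (l.count c : Int)) :=
    List.map_congr_left (fun c _ => by rw [hperm.count_eq])
  rw [hmap]
  refine List.Perm.map _ ?_
  apply (List.perm_ext_iff_of_nodup (PySem.List.nodup_dedup _) (PySem.List.nodup_dedup _)).mpr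
  intro x
  rw [PySem.List.mem_dedup, PySem.List.mem_dedup]
  exact ⟨fun h => hperm.mem_iff.mp h, fun h => hperm.mem_iff.mpr h⟩

-- min with the identity key only depends on the multiset
theorem pv_min_perm (xs ys : List Int) (h : xs.Perm ys) :
    PySem.List.min? xs (fun x => x) = PySem.List.min? ys (fun x => x) := by
  cases hx : PySem.List.min? xs (fun x : Int => x) with
  | none =>
    have hxs : xs = [] := (PySem.List.min?_eq_none_iff _ _).mp hx
    subst hxs
    have hys : ys = [] := h.nil_eq.symm
    subst hys
    exact ((PySem.List.min?_eq_none_iff _ _).mpr rfl).symm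
  | some m =>
    cases hy : PySem.List.min? ys (fun x : Int => x) with
    | none =>
      have hys : ys = [] := (PySem.List.min?_eq_none_iff _ _).mp hy
      subst hys
      have hxs : xs = [] := h.eq_nil
      subst hxs
      rw [(PySem.List.min?_eq_none_iff _ _).mpr rfl] at hx
      exact absurd hx (by simp)
    | some m' =>
      have hm : m ∈ xs := PySem.List.min?_mem hx
      have hm' : m' ∈ ys := PySem.List.min?_mem hy
      have h1 : m ≤ m' := PySem.List.min?_isMin hx m' (h.mem_iff.mpr hm')
      have h2 : m' ≤ m := PySem.List.min?_isMin hy m (h.mem_iff.mp hm)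
      rw [le_antisymm h1 h2]

-- ===== VERDICT (by name: the statement is the Claim_ definition above) =====
theorem longest_good_subsequence_length_spec : Claim_equal_longest_good_subsequence_length := by
  intro n k s _ _
  unfold Spec_longest_good_subsequence_length
  unfold longest_good_subsequence_length longest_good_subsequence_length_alt
  simp only [pv_fold_eq_counter]
  have hperm := pv_counts_perm s.toList
  set st := (PySem.List.sorted s.toList (fun c => c) false).foldl pvStep ([], 0, none) with hst
  have hfin : (if st.2.1 ≠ 0 then st.1 ++ [st.2.1] else st.1) = pvFinish st := rfl
  rw [hfin]
  have hvlen : ((PySem.Dict.counter s.toList).values).length = (PySem.Dict.counter s.toList).size := by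
    rw [pv_values_counter, List.length_map, pv_size_counter]
  have hlen : (PySem.Dict.counter s.toList).size = (pvFinish st).length := by
    rw [hperm.length_eq, hvlen]
  rw [hlen, pv_min_perm _ _ hperm]
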